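-- pv_equiv track=rewrite | github.com/hzfsls/grammar-study | lang_sols/euler.py | self_powers
-- ===== SOURCE A (Python) =====
-- def self_powers(n: int) -> str:
--     digits = [0] * 10
--     for i in range(1, n + 1):
--         temp_digits = [0] * 10
--         temp_digits[0] = 1
--         for j in range(i):
--             carry = 0
--             for k in range(10):
--                 temp_digits[k] = temp_digits[k] * i + carry
--                 carry = temp_digits[k] // 10
--                 temp_digits[k] %= 10
--         for j in range(10):
--             digits[j] += temp_digits[j]
--             if digits[j] >= 10:
--                 digits[j] -= 10
--                 if j < 9:
--                     digits[j + 1] += 1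
--     result = ""
--     for i in range(9, -1, -1):
--         result += str(digits[i])
--     return result
-- ===== SOURCE B (Python) =====
-- def self_powers(n: int) -> str:
--     M = 10 ** 10
--     total = 0
--     for i in range(1, n + 1):
--         base = i % M
--         acc = 1
--         e = i
--         while e > 0:
--             if e % 2 == 1:
--                 acc = acc * base % M
--             base = base * base % M
--             e //= 2
--         total = (total + acc) % M
--     return str(total).zfill(10)
-- ===== Notes on version B (the rewrite author's own statement) =====
-- stated objective: faster
-- what changed: Replaces A's per-power manual base-10 digit-array arithmetic (i repeated digit-by-digit multiplications per term) with native-int square-and-multiply modulo 10**10 and a running total, padding the result with zfill.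
import Mathlib
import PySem

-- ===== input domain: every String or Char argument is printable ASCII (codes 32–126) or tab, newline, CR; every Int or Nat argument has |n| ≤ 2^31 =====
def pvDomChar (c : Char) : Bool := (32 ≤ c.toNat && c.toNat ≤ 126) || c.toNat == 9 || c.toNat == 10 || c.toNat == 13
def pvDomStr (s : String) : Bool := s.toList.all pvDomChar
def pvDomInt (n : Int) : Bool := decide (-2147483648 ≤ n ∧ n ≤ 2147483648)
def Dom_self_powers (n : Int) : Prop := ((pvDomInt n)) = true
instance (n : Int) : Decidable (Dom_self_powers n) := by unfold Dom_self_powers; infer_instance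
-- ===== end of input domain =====

-- B replaces A's per-power manual base-10 digit-array arithmetic with native-int
-- square-and-multiply modulo 10^10 and a running total (objective: faster).

-- ===== PORT A =====
-- inner k-loop of A: one digit-by-digit multiply-by-i pass with carry, final carry dropped
def pvMulPass (i carry : Int) : List Int → List Int
  | [] => []
  | d :: ds =>
      PySem.Int.mod (d * i + carry) 10 :: pvMulPass i (PySem.Int.floordiv (d * i + carry) 10) ds

-- j-loop of A: temp_digits = [0]*10; temp_digits[0] = 1; for j in range(i): multiply pass
def pvPowDigits (i : Int) : List Int :=
  (PySem.List.pyRange 0 i 1).foldl (fun t _ => pvMulPass i 0 t) ((List.replicate 10 0).set 0 1)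

-- add loop of A: digits[j] += temp[j]; if >= 10 subtract 10 and carry into j+1 (dropped at j=9)
def pvAddPass : Int → List Int → List Int → List Int
  | _, [], _ => []
  | _, ds, [] => ds
  | c, d :: ds, t :: ts =>
      if 10 ≤ d + t + c then (d + t + c - 10) :: pvAddPass 1 ds ts
      else (d + t + c) :: pvAddPass 0 ds ts

def self_powers (n : Int) : String :=
  let digits := (PySem.List.pyRange 1 (n + 1) 1).foldl
      (fun dg i => pvAddPass 0 dg (pvPowDigits i)) (List.replicate 10 0)
  -- result = ""; for i in range(9, -1, -1): result += str(digits[i])   (built over List Char)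
  String.ofList ((PySem.List.pyRange 9 (-1) (-1)).foldl
      (fun r k => r ++ PySem.Int.toChars (PySem.List.pyGetD digits k 0)) [])

-- ===== PORT B =====
-- while e > 0: square-and-multiply step of Source B
def pvSqMul (M base acc : Int) (e : Nat) : Int :=
  if e = 0 then acc
  else pvSqMul M (PySem.Int.mod (base * base) M)
        (if e % 2 = 1 then PySem.Int.mod (acc * base) M else acc) (e / 2)
  termination_by e
  decreasing_by omega

def self_powers_alt (n : Int) : String :=
  let M : Int := 10 ^ 10
  let total := (PySem.List.pyRange 1 (n + 1) 1).foldl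
      (fun total i => PySem.Int.mod (total + pvSqMul M (PySem.Int.mod i M) 1 i.toNat) M) 0
  PySem.Str.zfill (PySem.Int.toStr total) 10

-- ===== PRECONDITION & SPEC =====
def Spec_self_powers (n : Int) (out : String) : Prop := out = self_powers_alt n
instance (n : Int) (out : String) : Decidable (Spec_self_powers n out) := by
  unfold Spec_self_powers; infer_instance

-- ===== CLAIM (what is proved, stated in full; the proofs are below) =====
def Claim_equal_self_powers : Prop := ∀ (n : Int), Dom_self_powers n → Spec_self_powers n (self_powers n)

-- ===== LEMMAS AND PROOFS =====

-- value of a little-endian digit list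
def pvVal : List Int → Int
  | [] => 0
  | d :: ds => d + 10 * pvVal ds

def pvGoodD (ds : List Int) : Prop := ∀ d ∈ ds, 0 ≤ d ∧ d < 10

-- the common mathematical accumulator both loops compute
def pvF (l : List Int) (a : Int) : Int := l.foldl (fun a i => (a + i ^ i.toNat) % (10 ^ 10)) a

lemma pvVal_bounds {ds : List Int} (h : pvGoodD ds) :
    0 ≤ pvVal ds ∧ pvVal ds < 10 ^ ds.length := by
  induction ds with
  | nil => simp [pvVal]
  | cons d ds ih =>
      have hd := h d (by simp)
      have hds : pvGoodD ds := fun x hx => h x (by simp [hx])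
      have := ih hds
      simp only [pvVal, List.length_cons, pow_succ]
      constructor <;> nlinarith [this.1, this.2, hd.1, hd.2]

lemma pvChunk (r x m : Int) (hm : 0 < m) (hr : 0 ≤ r) (hr' : r < 10) :
    (r + 10 * x) % (10 * m) = r + 10 * (x % m) := by
  have h1 : (10 * x) % (10 * m) = 10 * (x % m) := Int.mul_emod_mul_of_pos _ _ (by norm_num)
  have hx1 : 0 ≤ x % m := Int.emod_nonneg x (by omega)
  have hx2 : x % m < m := Int.emod_lt_of_pos x hm
  have hr2 : r % (10 * m) = r := Int.emod_eq_of_lt hr (by nlinarith)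
  calc (r + 10 * x) % (10 * m) = (r % (10 * m) + (10 * x) % (10 * m)) % (10 * m) := by
        rw [Int.add_emod]
    _ = (r + 10 * (x % m)) % (10 * m) := by rw [h1, hr2]
    _ = r + 10 * (x % m) := Int.emod_eq_of_lt (by nlinarith) (by nlinarith)

lemma pvMulPass_spec (i : Int) (hi : 0 ≤ i) :
    ∀ (ds : List Int) (c : Int), 0 ≤ c → pvGoodD ds →
      pvGoodD (pvMulPass i c ds) ∧ (pvMulPass i c ds).length = ds.length ∧
      pvVal (pvMulPass i c ds) = (pvVal ds * i + c) % 10 ^ ds.length := by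
  intro ds
  induction ds with
  | nil => intro c hc _; simp [pvMulPass, pvVal, pvGoodD]
  | cons d ds ih =>
      intro c hc hg
      have hd := hg d (by simp)
      have hds : pvGoodD ds := fun x hx => hg x (by simp [hx])
      set s := d * i + c with hs
      have hs0 : 0 ≤ s := by nlinarith [hd.1, hd.2]
      have hmod : PySem.Int.mod s 10 = s % 10 := by
        simp [PySem.Int.mod, Int.fmod_eq_emod]
      have hdiv : PySem.Int.floordiv s 10 = s / 10 := by
        simp [PySem.Int.floordiv, Int.fdiv_eq_ediv]
      have hq : 0 ≤ s / 10 := Int.ediv_nonneg hs0 (by norm_num)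
      obtain ⟨ihg, ihl, ihv⟩ := ih (s / 10) hq hds
      have hr1 : 0 ≤ s % 10 := Int.emod_nonneg s (by norm_num)
      have hr2 : s % 10 < 10 := Int.emod_lt_of_pos s (by norm_num)
      refine ⟨?_, ?_, ?_⟩
      · intro x hx
        simp only [pvMulPass, ← hs, hmod, hdiv, List.mem_cons] at hx
        rcases hx with h | h
        · subst h; exact ⟨hr1, hr2⟩
        · exact ihg x h
      · simp [pvMulPass, ← hs, ihl]
      · simp only [pvMulPass, ← hs, hmod, hdiv, pvVal, ihv, List.length_cons, pow_succ]
        have hsplit : s = 10 * (s / 10) + s % 10 := (Int.mul_ediv_add_emod s 10).symm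
        have : (d + 10 * pvVal ds) * i + c = s % 10 + 10 * (pvVal ds * i + s / 10) := by
          nlinarith [hsplit]
        rw [this, mul_comm (10 ^ ds.length) 10,
          pvChunk _ _ _ (by positivity) hr1 hr2]

lemma pvAddPass_spec :
    ∀ (ds ts : List Int) (c : Int), ds.length = ts.length → 0 ≤ c → c ≤ 1 →
      pvGoodD ds → pvGoodD ts →
      pvGoodD (pvAddPass c ds ts) ∧ (pvAddPass c ds ts).length = ds.length ∧
      pvVal (pvAddPass c ds ts) = (pvVal ds + pvVal ts + c) % 10 ^ ds.length := by
  intro ds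
  induction ds with
  | nil =>
      intro ts c hlen _ _ _ _
      have : ts = [] := by simpa using hlen.symm
      subst this; simp [pvAddPass, pvVal, pvGoodD]
  | cons d ds ih =>
      intro ts c hlen hc0 hc1 hgd hgt
      cases ts with
      | nil => simp at hlen
      | cons t ts =>
          have hd := hgd d (by simp)
          have ht := hgt t (by simp)
          have hds : pvGoodD ds := fun x hx => hgd x (by simp [hx])
          have hts : pvGoodD ts := fun x hx => hgt x (by simp [hx])
          have hlen' : ds.length = ts.length := by simpa using hlen
          by_cases hb : 10 ≤ d + t + c
          · obtain ⟨ihg, ihl, ihv⟩ := ih ts 1 hlen' (by norm_num) (by norm_num) hds hts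
            refine ⟨?_, ?_, ?_⟩
            · intro x hx
              simp only [pvAddPass, if_pos hb, List.mem_cons] at hx
              rcases hx with h | h
              · subst h; constructor <;> omega
              · exact ihg x h
            · simp [pvAddPass, if_pos hb, ihl]
            · simp only [pvAddPass, if_pos hb, pvVal, ihv, List.length_cons, pow_succ]
              have : d + 10 * pvVal ds + (t + 10 * pvVal ts) + c
                  = (d + t + c - 10) + 10 * (pvVal ds + pvVal ts + 1) := by ring
              rw [this, mul_comm (10 ^ ds.length) 10,
                pvChunk _ _ _ (by positivity) (by omega) (by omega)]
          · obtain ⟨ihg, ihl, ihv⟩ := ih ts 0 hlen' (by norm_num) (by norm_num) hds hts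
            refine ⟨?_, ?_, ?_⟩
            · intro x hx
              simp only [pvAddPass, if_neg hb, List.mem_cons] at hx
              rcases hx with h | h
              · subst h; constructor <;> omega
              · exact ihg x h
            · simp [pvAddPass, if_neg hb, ihl]
            · simp only [pvAddPass, if_neg hb, pvVal, ihv, List.length_cons, pow_succ]
              have : d + 10 * pvVal ds + (t + 10 * pvVal ts) + c
                  = (d + t + c) + 10 * (pvVal ds + pvVal ts + 0) := by ring
              rw [this, mul_comm (10 ^ ds.length) 10,
                pvChunk _ _ _ (by positivity) (by omega) (by omega)]

lemma pvModMod (x M : Int) : x % M % M = x % M := Int.emod_emod_of_dvd x dvd_rfl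

lemma pvMulModL (a b M : Int) : a % M * b % M = a * b % M := by
  rw [Int.mul_emod, pvModMod, ← Int.mul_emod]

lemma pvAddModR (a b M : Int) : (a + b % M) % M = (a + b) % M := by
  rw [Int.add_emod, pvModMod, ← Int.add_emod]

lemma pvPowModL (a : Int) (b : Nat) (n : Int) : (a % n) ^ b % n = a ^ b % n := by
  induction b with
  | zero => simp
  | succ k ih =>
      rw [pow_succ, pow_succ, Int.mul_emod, ih, pvModMod, ← Int.mul_emod]

lemma pvSqStep (M b x : Int) (h : Nat) : x * (b * b % M) ^ h % M = x * b ^ (2 * h) % M := by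
  rw [Int.mul_emod, pvPowModL, ← Int.mul_emod, ← sq, ← pow_mul]

lemma pvMulFold (i : Int) (hi : 0 ≤ i) :
    ∀ (l : List Int) (t : List Int), pvGoodD t → t.length = 10 →
      pvGoodD (l.foldl (fun t _ => pvMulPass i 0 t) t) ∧
      (l.foldl (fun t _ => pvMulPass i 0 t) t).length = 10 ∧
      pvVal (l.foldl (fun t _ => pvMulPass i 0 t) t) = pvVal t * i ^ l.length % 10 ^ 10 := by
  intro l
  induction l with
  | nil =>
      intro t hg hlen
      obtain ⟨h0, h1⟩ := pvVal_bounds hg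
      rw [hlen] at h1
      exact ⟨hg, hlen, by simpa using (Int.emod_eq_of_lt h0 h1).symm⟩
  | cons j l ih =>
      intro t hg hlen
      obtain ⟨mg, ml, mv⟩ := pvMulPass_spec i hi t 0 le_rfl hg
      rw [hlen] at ml mv
      obtain ⟨rg, rl, rv⟩ := ih (pvMulPass i 0 t) mg ml
      refine ⟨rg, rl, ?_⟩
      simp only [List.foldl_cons] at *
      rw [rv, mv]
      simp only [add_zero, List.length_cons]
      rw [pvMulModL, mul_assoc, ← pow_succ']

lemma pvPowDigits_spec (i : Int) (hi : 1 ≤ i) :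
    pvGoodD (pvPowDigits i) ∧ (pvPowDigits i).length = 10 ∧
    pvVal (pvPowDigits i) = i ^ i.toNat % 10 ^ 10 := by
  have ht : (List.replicate 10 (0:Int)).set 0 1 = [1,0,0,0,0,0,0,0,0,0] := by rfl
  have hg : pvGoodD ([1,0,0,0,0,0,0,0,0,0] : List Int) := by
    intro d hd; simp at hd; rcases hd with h | h <;> omega
  have hv : pvVal ([1,0,0,0,0,0,0,0,0,0] : List Int) = 1 := by norm_num [pvVal]
  have hlen : (PySem.List.pyRange 0 i 1).length = i.toNat := by
    rw [PySem.List.length_pyRange_one]; norm_num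
  obtain ⟨a, b, c⟩ := pvMulFold i (by omega) (PySem.List.pyRange 0 i 1)
      [1,0,0,0,0,0,0,0,0,0] hg (by rfl)
  unfold pvPowDigits
  rw [ht]
  exact ⟨a, b, by rw [c, hv, hlen, one_mul]⟩

lemma pvA_loop_spec (l : List Int) :
    ∀ (dg : List Int) (a : Int), (∀ i ∈ l, 1 ≤ i) → pvGoodD dg → dg.length = 10 → pvVal dg = a →
      pvGoodD (l.foldl (fun dg i => pvAddPass 0 dg (pvPowDigits i)) dg) ∧
      (l.foldl (fun dg i => pvAddPass 0 dg (pvPowDigits i)) dg).length = 10 ∧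
      pvVal (l.foldl (fun dg i => pvAddPass 0 dg (pvPowDigits i)) dg) = pvF l a := by
  induction l with
  | nil => intro dg a _ hg hlen hv; exact ⟨hg, hlen, by simpa [pvF] using hv⟩
  | cons i l ih =>
      intro dg a hl hg hlen hv
      have hi : 1 ≤ i := hl i (by simp)
      have hl' : ∀ j ∈ l, 1 ≤ j := fun j hj => hl j (by simp [hj])
      obtain ⟨pg, pl, pv⟩ := pvPowDigits_spec i hi
      obtain ⟨ag, al, av⟩ := pvAddPass_spec dg (pvPowDigits i) 0 (by omega)
        le_rfl (by norm_num) hg pg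
      rw [hlen] at av al
      have hstep : pvVal (pvAddPass 0 dg (pvPowDigits i)) = (a + i ^ i.toNat) % 10 ^ 10 := by
        rw [av, pv, hv, add_zero, pvAddModR]
      obtain ⟨rg, rl, rv⟩ := ih (pvAddPass 0 dg (pvPowDigits i))
        ((a + i ^ i.toNat) % 10 ^ 10) hl' ag al hstep
      exact ⟨rg, rl, by simpa [pvF] using rv⟩

lemma pvSqMul_spec (M : Int) (hM : 0 < M) :
    ∀ (e : Nat) (base acc : Int), 0 ≤ acc → acc < M →
      pvSqMul M base acc e = acc * base ^ e % M := by
  have hmod : ∀ x : Int, PySem.Int.mod x M = x % M := by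
    intro x; simp [PySem.Int.mod, Int.fmod_eq_emod]; omega
  intro e
  induction e using Nat.strong_induction_on with
  | _ e ih =>
      intro base acc h0 h1
      rw [pvSqMul]
      by_cases he : e = 0
      · simp [he, Int.emod_eq_of_lt h0 h1]
      · rw [if_neg he]
        have hlt : e / 2 < e := by omega
        by_cases hp : e % 2 = 1
        · rw [if_pos hp]
          have ha0 : 0 ≤ acc * base % M := Int.emod_nonneg _ (by omega)
          have ha1 : acc * base % M < M := Int.emod_lt_of_pos _ hM
          rw [hmod, hmod, ih _ hlt _ _ ha0 ha1, pvMulModL, pvSqStep,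
            mul_assoc, ← pow_succ']
          rw [show 2 * (e / 2) + 1 = e by omega]
        · rw [if_neg hp]
          rw [hmod, ih _ hlt _ _ h0 h1, pvSqStep]
          rw [show 2 * (e / 2) = e by omega]

lemma pvB_loop_spec (l : List Int) : ∀ (a : Int), (∀ i ∈ l, 1 ≤ i) →
    l.foldl (fun total i => PySem.Int.mod (total + pvSqMul (10 ^ 10) (PySem.Int.mod i (10 ^ 10)) 1 i.toNat) (10 ^ 10)) a
      = pvF l a := by
  induction l with
  | nil => intro a _; simp [pvF]
  | cons i l ih =>
      intro a hl
      have hi : 1 ≤ i := hl i (by simp)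
      have hl' : ∀ j ∈ l, 1 ≤ j := fun j hj => hl j (by simp [hj])
      have hmod : ∀ x : Int, PySem.Int.mod x (10 ^ 10) = x % 10 ^ 10 := by
        intro x; simp [PySem.Int.mod, Int.fmod_eq_emod]
      have hsq : pvSqMul (10 ^ 10) (PySem.Int.mod i (10 ^ 10)) 1 i.toNat
          = i ^ i.toNat % 10 ^ 10 := by
        rw [pvSqMul_spec _ (by norm_num) _ _ _ (by norm_num) (by norm_num), one_mul,
          hmod, pvPowModL]
      simp only [List.foldl_cons, pvF] at *
      rw [hsq, hmod, pvAddModR]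
      exact ih _ hl'

lemma pvVal_getElem :
    ∀ (ds : List Int), pvGoodD ds → ∀ (k : Nat) (h : k < ds.length),
      ds[k] = pvVal ds / 10 ^ k % 10 := by
  intro ds
  induction ds with
  | nil => intro _ k h; simp at h
  | cons d ds ih =>
      intro hg k h
      have hd := hg d (by simp)
      have hds : pvGoodD ds := fun x hx => hg x (by simp [hx])
      obtain ⟨hv0, _⟩ := pvVal_bounds hds
      cases k with
      | zero =>
          simp only [List.getElem_cons_zero, pvVal, pow_zero, Int.ediv_one]
          rw [Int.add_mul_emod_self_left, Int.emod_eq_of_lt hd.1 hd.2]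
      | succ k =>
          simp only [List.getElem_cons_succ, pvVal]
          rw [ih hds k (by simpa using h)]
          congr 1
          rw [pow_succ', ← Int.ediv_ediv_of_nonneg]
          congr 1
          rw [Int.add_mul_ediv_left _ _ (by norm_num : (10:Int) ≠ 0),
            Int.ediv_eq_zero_of_lt hd.1 hd.2, zero_add]
          norm_num

lemma pvPadDigits :
    ∀ (e mn : Nat), 1 ≤ e → mn < 10 ^ e →
      List.replicate (e - (Nat.toDigits 10 mn).length) '0' ++ Nat.toDigits 10 mn
        = ((List.range e).reverse).map (fun k => Nat.digitChar (mn / 10 ^ k % 10)) := by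
  intro e
  induction e with
  | zero => intro mn h; omega
  | succ k ih =>
      intro mn _ hlt
      by_cases hk : k = 0
      · subst hk
        have h10 : mn < 10 := by omega
        rw [Nat.toDigits_of_lt_base h10]
        simp [Nat.mod_eq_of_lt h10]
      · have hk1 : 1 ≤ k := by omega
        have hsplit : ((List.range (k + 1)).reverse).map
              (fun j => Nat.digitChar (mn / 10 ^ j % 10))
            = ((List.range k).reverse).map (fun j => Nat.digitChar (mn / 10 ^ (j + 1) % 10))
              ++ [Nat.digitChar (mn / 10 ^ 0 % 10)] := by
          rw [List.range_succ_eq_map]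
          simp [List.map_reverse, List.map_map, Function.comp_def]
        have hfun : (fun j => Nat.digitChar (mn / 10 ^ (j + 1) % 10))
            = (fun j => Nat.digitChar ((mn / 10) / 10 ^ j % 10)) := by
          funext j
          rw [Nat.div_div_eq_div_mul, ← pow_succ']
        have hdivlt : mn / 10 < 10 ^ k := by
          apply Nat.div_lt_of_lt_mul
          calc mn < 10 ^ (k + 1) := hlt
            _ = 10 * 10 ^ k := by rw [pow_succ']
        rw [hsplit, hfun]
        rw [← ih (mn / 10) hk1 hdivlt]
        by_cases hm : 10 ≤ mn
        · rw [Nat.toDigits_of_base_le (by norm_num) hm]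
          have h1 : k + 1 - ((Nat.toDigits 10 (mn / 10)).length + 1)
              = k - (Nat.toDigits 10 (mn / 10)).length := by omega
          simp [h1, List.append_assoc]
        · have h10 : mn < 10 := by omega
          have hz : mn / 10 = 0 := by omega
          rw [Nat.toDigits_of_lt_base h10, hz]
          have : Nat.toDigits 10 0 = ['0'] := Nat.toDigits_zero 10
          rw [this]
          simp only [List.length_cons, List.length_nil, pow_zero, Nat.div_one,
            Nat.mod_eq_of_lt h10]
          rw [show k + 1 - 1 = k by omega]
          rw [show (List.replicate k '0' : List Char)
              = List.replicate (k - 1) '0' ++ ['0'] by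
            rw [← List.replicate_succ', show k - 1 + 1 = k by omega]]

lemma pvToCharsDigit (d : Int) (h0 : 0 ≤ d) (h1 : d < 10) :
    PySem.Int.toChars d = [Nat.digitChar d.toNat] := by
  unfold PySem.Int.toChars
  rw [if_neg (by omega)]
  exact Nat.toDigits_of_lt_base (by omega)

lemma pvCastDigit (mn k : Nat) : ((mn : Int) / 10 ^ k % 10).toNat = mn / 10 ^ k % 10 := by
  have h1 : ((mn : Int) / (10:Int) ^ k % 10) = ((mn / 10 ^ k % 10 : Nat) : Int) := by
    push_cast; rfl
  rw [h1, Int.toNat_natCast]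

lemma pvZfillDigits (mn : Nat) (h : mn < 10 ^ 10) :
    PySem.Chars.zfill (Nat.toDigits 10 mn) 10
      = List.replicate (10 - (Nat.toDigits 10 mn).length) '0' ++ Nat.toDigits 10 mn := by
  have hlen : (Nat.toDigits 10 mn).length ≤ 10 :=
    (Nat.length_toDigits_le_iff (by norm_num) (by norm_num)).2 h
  have hpos : 0 < (Nat.toDigits 10 mn).length := Nat.length_toDigits_pos
  obtain ⟨c, rest, hcs⟩ : ∃ c rest, Nat.toDigits 10 mn = c :: rest := by
    cases h' : Nat.toDigits 10 mn with
    | nil => rw [h'] at hpos; simp at hpos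
    | cons a b => exact ⟨a, b, rfl⟩
  have hc : c.isDigit := Nat.isDigit_of_mem_toDigits (b := 10) (n := mn) (by norm_num)
    (by norm_num) (by rw [hcs]; simp)
  have hcne : ¬ (c = '+' ∨ c = '-') := by
    rintro (rfl | rfl) <;> simp [Char.isDigit] at hc
  rw [hcs] at hlen ⊢
  simp only [PySem.Chars.zfill]
  by_cases hb : (10:Int) ≤ ((c :: rest).length : Int)
  · rw [if_pos hb]
    have h10 : (c :: rest).length = 10 := le_antisymm hlen (by exact_mod_cast hb)
    rw [h10]
    simp
  · rw [if_neg hb]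
    simp [hcne]

-- ===== VERDICT (by name: the statement is the Claim_ definition above) =====
set_option maxHeartbeats 1000000 in
theorem self_powers_spec : Claim_equal_self_powers := by
  intro n _
  unfold Spec_self_powers self_powers self_powers_alt
  simp only []
  set l := PySem.List.pyRange 1 (n + 1) 1 with hldef
  have hmem : ∀ i ∈ l, 1 ≤ i := by
    intro i hi
    rw [hldef, PySem.List.mem_pyRange_one] at hi
    omega
  have hinit_g : pvGoodD (List.replicate 10 (0:Int)) := by
    intro d hd
    rw [List.mem_replicate] at hd
    omega
  obtain ⟨dg_g, dg_l, dg_v⟩ := pvA_loop_spec l (List.replicate 10 (0:Int)) 0 hmem hinit_g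
    (by simp) (by rfl)
  have hB := pvB_loop_spec l 0 hmem
  set digits := l.foldl (fun dg i => pvAddPass 0 dg (pvPowDigits i)) (List.replicate 10 (0:Int))
    with hdg
  set m := pvF l 0 with hm
  obtain ⟨hm0, hm1⟩ := pvVal_bounds dg_g
  rw [dg_l, dg_v] at hm1
  rw [dg_v] at hm0
  rw [hB]
  set mn := m.toNat with hmn
  have hmcast : (mn : Int) = m := Int.toNat_of_nonneg hm0
  have hmnlt : mn < 10 ^ 10 := by
    have : (mn : Int) < (10:Int) ^ 10 := by rw [hmcast]; exact hm1
    exact_mod_cast this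
  have htc : PySem.Int.toChars m = Nat.toDigits 10 mn := by
    unfold PySem.Int.toChars
    rw [if_neg (by omega)]
  have hrhs : PySem.Str.zfill (PySem.Int.toStr m) 10
      = String.ofList (PySem.Chars.zfill (PySem.Int.toChars m) 10) := by
    rw [PySem.Str.zfill, PySem.Int.toList_toStr]
  rw [hrhs, htc, pvZfillDigits mn hmnlt, pvPadDigits 10 mn (by norm_num) hmnlt]
  congr 1
  have key : ∀ (k : Nat), k < 10 →
      PySem.Int.toChars (PySem.List.pyGetD digits (k:Int) 0)
        = [Nat.digitChar (mn / 10 ^ k % 10)] := by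
    intro k hk
    rw [PySem.List.pyGetD_ofNat digits k 0 (by omega : k < digits.length),
      pvVal_getElem digits dg_g k (by omega), dg_v,
      pvToCharsDigit _ (Int.emod_nonneg _ (by norm_num)) (Int.emod_lt_of_pos _ (by norm_num))]
    congr 1
    rw [← hmcast, pvCastDigit]
  have k0 := key 0 (by norm_num)
  have k1 := key 1 (by norm_num)
  have k2 := key 2 (by norm_num)
  have k3 := key 3 (by norm_num)
  have k4 := key 4 (by norm_num)
  have k5 := key 5 (by norm_num)
  have k6 := key 6 (by norm_num)
  have k7 := key 7 (by norm_num)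
  have k8 := key 8 (by norm_num)
  have k9 := key 9 (by norm_num)
  norm_num at k0 k1 k2 k3 k4 k5 k6 k7 k8 k9
  rw [show PySem.List.pyRange 9 (-1) (-1) = [9,8,7,6,5,4,3,2,1,0] from by decide]
  simp only [List.foldl_cons, List.foldl_nil, List.nil_append]
  rw [k0, k1, k2, k3, k4, k5, k6, k7, k8, k9]
  simp [List.range_succ]
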